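-- pv_equiv track=rewrite | github.com/daniel-reich/ubiquitous-fiesta | KveKxSD9t8fX7ybSt_11.py | final_countdown
-- ===== SOURCE A (Python) =====
-- def final_countdown(lst):
--   res = [lst.count(1), []]
--   i = 0
--   for _ in range(res[0]):
--     i = lst.index(1, i) + 1
--     j = i - 2
--     while j >= 0:
--       if not lst[j] == lst[j+1] + 1:
--         break
--       j -= 1
--     res[1].append(lst[j+1:i])
--   return res
-- ===== SOURCE B (Python) =====
-- def final_countdown(lst):
--   runs = []
--   start = 0
--   for i in range(len(lst)):
--     if i > 0 and lst[i] != lst[i - 1] - 1: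
--       start = i
--     if lst[i] == 1:
--       runs.append(lst[start:i + 1])
--   return [len(runs), runs]
-- ===== Notes on version B (the rewrite author's own statement) =====
-- stated objective: alternative
-- what changed: Replaces count-then-repeated-index-then-backward-rescan per 1 with a single left-to-right pass maintaining the current run's start index; the first element becomes len(runs), which equals lst.count(1).
import Mathlib
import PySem

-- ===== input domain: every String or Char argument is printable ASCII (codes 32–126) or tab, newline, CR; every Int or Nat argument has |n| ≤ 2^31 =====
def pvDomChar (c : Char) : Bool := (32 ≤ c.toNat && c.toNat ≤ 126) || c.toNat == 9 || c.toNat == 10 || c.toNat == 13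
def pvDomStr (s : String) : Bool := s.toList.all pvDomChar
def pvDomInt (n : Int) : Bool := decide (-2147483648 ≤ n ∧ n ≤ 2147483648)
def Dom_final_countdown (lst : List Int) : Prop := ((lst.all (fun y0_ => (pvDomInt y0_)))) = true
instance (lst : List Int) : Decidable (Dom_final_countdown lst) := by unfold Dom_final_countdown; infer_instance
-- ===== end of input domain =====

-- B replaces A's count/index/backward-rescan per 1 by one left-to-right pass keeping the
-- current run's start index; same return value everywhere (alternative decomposition).

-- ===== PORT A =====
-- inner 'while j >= 0: if not lst[j] == lst[j+1] + 1: break; j -= 1', returning the final j.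
-- lst[j], lst[j+1] are in range whenever called (0 ≤ j, j+1 < i ≤ len), so getD is exact.
def whileA (lst : List Int) (j : Int) : Int :=
  if 0 ≤ j then
    if lst.getD j.toNat 0 = lst.getD (j.toNat + 1) 0 + 1 then whileA lst (j - 1) else j
  else j
termination_by (j + 1).toNat
decreasing_by omega

-- 'for _ in range(res[0])' body; 'lst.index(1, i)' = i + first index of 1 in lst[i:].
-- The 'none' arm is Python's ValueError; it is unreachable (the loop runs lst.count(1) times).
def aLoop (lst : List Int) : Nat → Nat → List (List Int) → List (List Int)
  | 0, _, acc => acc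
  | k + 1, i, acc =>
    match PySem.List.index? (lst.drop i) 1 with
    | none => acc
    | some d =>
      let i' := i + d + 1
      aLoop lst k i'
        (acc ++ [PySem.List.slice lst (some (whileA lst ((i' : Int) - 2) + 1)) (some (i' : Int))])

def final_countdown (lst : List Int) : Int × List (List Int) :=
  let c := PySem.List.count lst 1
  ((c : Int), aLoop lst c 0 [])

-- ===== PORT B =====
-- loop body of Source B: state (start, runs); lst[i], lst[i-1] are in range (i < len), so getD is exact.
def altStep (lst : List Int) (st : Nat × List (List Int)) (i : Nat) : Nat × List (List Int) :=
  let start := if 0 < i ∧ lst.getD i 0 ≠ lst.getD (i - 1) 0 - 1 then i else st.1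
  let runs := if lst.getD i 0 = 1
    then st.2 ++ [PySem.List.slice lst (some (start : Int)) (some ((i : Int) + 1))]
    else st.2
  (start, runs)

def final_countdown_alt (lst : List Int) : Int × List (List Int) :=
  let runs := ((List.range lst.length).foldl (altStep lst) (0, [])).2
  ((runs.length : Int), runs)

-- ===== PRECONDITION & SPEC =====
def Spec_final_countdown (lst : List Int) (out : Int × List (List Int)) : Prop := out = final_countdown_alt lst
instance (lst : List Int) (out : Int × List (List Int)) : Decidable (Spec_final_countdown lst out) := by unfold Spec_final_countdown; infer_instance

-- ===== CLAIM (what is proved, stated in full; the proofs are below) =====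
def Claim_equal_final_countdown : Prop := ∀ (lst : List Int), Dom_final_countdown lst → Spec_final_countdown lst (final_countdown lst)

-- ===== LEMMAS AND PROOFS =====

-- start index of the maximal decreasing-by-one run ending at position p
def sIdx (lst : List Int) : Nat → Nat
  | 0 => 0
  | p + 1 => if lst.getD (p + 1) 0 = lst.getD p 0 - 1 then sIdx lst p else p + 1

def runAt (lst : List Int) (p : Nat) : List Int :=
  PySem.List.slice lst (some (sIdx lst p : Int)) (some ((p : Int) + 1))

-- positions ≥ i holding the value 1, in increasing order
def onesGE (lst : List Int) (i : Nat) : List Nat :=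
  if i < lst.length then (if lst.getD i 0 = 1 then [i] else []) ++ onesGE lst (i + 1) else []
termination_by lst.length - i

-- the start-index component of B's fold state after processing indices < m
def bStart (lst : List Int) : Nat → Nat
  | 0 => 0
  | k + 1 => sIdx lst k

theorem whileA_eq_sIdx (lst : List Int) (p : Nat) :
    whileA lst ((p : Int) - 1) + 1 = (sIdx lst p : Int) := by
  induction p with
  | zero =>
    rw [whileA]
    norm_num [sIdx]
  | succ p ih =>
    rw [show ((p + 1 : Nat) : Int) - 1 = (p : Int) by push_cast; ring]
    rw [whileA]
    have h0 : (0 : Int) ≤ (p : Int) := Int.natCast_nonneg p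
    simp only [h0, if_true, Int.toNat_natCast]
    have hsk : sIdx lst (p + 1)
        = if lst.getD (p + 1) 0 = lst.getD p 0 - 1 then sIdx lst p else p + 1 := rfl
    by_cases h : lst.getD p 0 = lst.getD (p + 1) 0 + 1
    · have h' : lst.getD (p + 1) 0 = lst.getD p 0 - 1 := by omega
      rw [if_pos h, hsk, if_pos h']
      exact ih
    · have h' : ¬ lst.getD (p + 1) 0 = lst.getD p 0 - 1 := by omega
      rw [if_neg h, hsk, if_neg h']
      push_cast; ring

theorem onesGE_eq_index (lst : List Int) (i : Nat) :
    onesGE lst i = match PySem.List.index? (lst.drop i) 1 with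
      | none => []
      | some d => (i + d) :: onesGE lst (i + d + 1) := by
  by_cases h : i < lst.length
  · have hdrop : lst.drop i = lst[i] :: lst.drop (i + 1) := List.drop_eq_getElem_cons h
    have hgetD : lst.getD i 0 = lst[i] := List.getD_eq_getElem lst 0 h
    rw [onesGE, if_pos h, hdrop, hgetD]
    by_cases h1 : lst[i] = 1
    · rw [PySem.List.index?_eq_idxOf?, List.idxOf?_cons,
        if_pos (beq_iff_eq.mpr h1), if_pos h1]
      rfl
    · rw [PySem.List.index?_cons_of_ne _ h1, if_neg h1]
      have ih := onesGE_eq_index lst (i + 1)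
      cases hx : PySem.List.index? (lst.drop (i + 1)) 1 with
      | none =>
        rw [hx] at ih
        simpa using ih
      | some d =>
        rw [hx] at ih
        have ih' : onesGE lst (i + 1) = (i + 1 + d) :: onesGE lst (i + 1 + d + 1) := ih
        have e1 : i + (d + 1) = i + 1 + d := by omega
        show [] ++ onesGE lst (i + 1) = (i + (d + 1)) :: onesGE lst (i + (d + 1) + 1)
        rw [List.nil_append, ih', e1]
  · have hnil : lst.drop i = [] := List.drop_eq_nil_of_le (by omega)
    rw [onesGE, if_neg h, hnil, PySem.List.index?_eq_idxOf?]
    rfl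
termination_by lst.length - i
decreasing_by omega

theorem count_drop_eq (lst : List Int) (i : Nat) :
    (lst.drop i).count 1 = (onesGE lst i).length := by
  by_cases h : i < lst.length
  · have hdrop : lst.drop i = lst[i] :: lst.drop (i + 1) := List.drop_eq_getElem_cons h
    have hgetD : lst.getD i 0 = lst[i] := List.getD_eq_getElem lst 0 h
    have ih := count_drop_eq lst (i + 1)
    rw [onesGE, if_pos h, hdrop, hgetD, List.count_cons]
    by_cases h1 : lst[i] = 1 <;> simp [h1, ih]
  · have hnil : lst.drop i = [] := List.drop_eq_nil_of_le (by omega)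
    rw [onesGE, if_neg h, hnil]
    rfl
termination_by lst.length - i
decreasing_by omega

theorem aLoop_eq (lst : List Int) (os : List Nat) :
    ∀ (i : Nat) (acc : List (List Int)), onesGE lst i = os →
      aLoop lst os.length i acc = acc ++ os.map (runAt lst) := by
  induction os with
  | nil => intro i acc _; simp [aLoop]
  | cons p os' ih =>
    intro i acc hos
    have hidx := onesGE_eq_index lst i
    rw [hos] at hidx
    cases hx : PySem.List.index? (lst.drop i) 1 with
    | none => rw [hx] at hidx; exact absurd hidx (by simp)
    | some d =>
      rw [hx] at hidx
      have hp : p = i + d := (List.cons.inj hidx).1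
      have hos' : onesGE lst (i + d + 1) = os' := ((List.cons.inj hidx).2).symm
      simp only [List.length_cons, aLoop, hx]
      have hrun : PySem.List.slice lst
          (some (whileA lst (((i + d + 1 : Nat) : Int) - 2) + 1)) (some ((i + d + 1 : Nat) : Int))
          = runAt lst p := by
        have hc : ((i + d + 1 : Nat) : Int) - 2 = ((i + d : Nat) : Int) - 1 := by push_cast; ring
        have hc2 : ((i + d + 1 : Nat) : Int) = ((i + d : Nat) : Int) + 1 := by push_cast; ring
        rw [hc, whileA_eq_sIdx lst (i + d), runAt, hp, hc2]
      rw [hrun, ih (i + d + 1) _ hos']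
      simp [hp]

theorem onesGE_eq_filter (lst : List Int) (k : Nat) :
    ∀ i, i + k = lst.length →
      onesGE lst i = ((List.range k).map (i + ·)).filter (fun p => lst.getD p 0 == 1) := by
  induction k with
  | zero => intro i h; rw [onesGE, if_neg (by omega)]; simp
  | succ k ih =>
    intro i h
    rw [List.range_succ_eq_map]
    have hmap : ((0 :: (List.range k).map (· + 1)).map (i + ·))
        = i :: (List.range k).map ((i + 1) + ·) := by
      simp [List.map_map, Function.comp]
      intro a _; omega
    rw [hmap, List.filter_cons]
    rw [onesGE, if_pos (by omega), ih (i + 1) (by omega)]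
    by_cases h1 : lst.getD i 0 = 1
    · rw [if_pos h1, if_pos (by simp only [beq_iff_eq]; exact h1)]
      rfl
    · rw [if_neg h1, if_neg (by simp only [beq_iff_eq]; exact h1)]
      rfl

theorem altFold_eq (lst : List Int) (m : Nat) :
    (List.range m).foldl (altStep lst) (0, []) =
      (bStart lst m,
       ((List.range m).filter (fun p => lst.getD p 0 == 1)).map (runAt lst)) := by
  induction m with
  | zero => simp [bStart]
  | succ m ih =>
    rw [List.range_succ, List.foldl_append, List.foldl_cons, List.foldl_nil, ih,
      List.filter_append, List.map_append]
    have hstart : (if 0 < m ∧ lst.getD m 0 ≠ lst.getD (m - 1) 0 - 1 then m else bStart lst m)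
        = sIdx lst m := by
      cases m with
      | zero => simp [bStart, sIdx]
      | succ k =>
        have hsk : sIdx lst (k + 1)
            = if lst.getD (k + 1) 0 = lst.getD k 0 - 1 then sIdx lst k else k + 1 := rfl
        by_cases hch : lst.getD (k + 1) 0 = lst.getD k 0 - 1
        · have hc' : ¬ (0 < k + 1 ∧ lst.getD (k + 1) 0 ≠ lst.getD (k + 1 - 1) 0 - 1) := by
            rw [Nat.add_sub_cancel]
            push Not
            intro _
            exact hch
          rw [if_neg hc', hsk, if_pos hch]
          rfl
        · have hc' : (0 < k + 1 ∧ lst.getD (k + 1) 0 ≠ lst.getD (k + 1 - 1) 0 - 1) :=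
            ⟨Nat.succ_pos k, by rw [Nat.add_sub_cancel]; exact hch⟩
          rw [if_pos hc', hsk, if_neg hch]
    simp only [altStep]
    rw [hstart]
    have hb : bStart lst (m + 1) = sIdx lst m := rfl
    rw [hb, List.filter_cons]
    by_cases h1 : lst.getD m 0 = 1
    · rw [if_pos h1, if_pos (by simp only [beq_iff_eq]; exact h1)]
      rfl
    · rw [if_neg h1, if_neg (by simp only [beq_iff_eq]; exact h1)]
      simp

theorem final_countdown_eq (lst : List Int) : final_countdown lst = final_countdown_alt lst := by
  have hones : onesGE lst 0 = (List.range lst.length).filter (fun p => lst.getD p 0 == 1) := by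
    rw [onesGE_eq_filter lst lst.length 0 (by omega)]
    congr 1
    simp
  have hcount : PySem.List.count lst 1 = (onesGE lst 0).length := by
    rw [PySem.List.count_eq]
    have h0 := count_drop_eq lst 0
    rw [List.drop_zero] at h0
    exact h0
  have hA : aLoop lst (PySem.List.count lst 1) 0 [] = (onesGE lst 0).map (runAt lst) := by
    rw [hcount]
    simpa using aLoop_eq lst (onesGE lst 0) 0 [] rfl
  have hlen : PySem.List.count lst 1 = ((onesGE lst 0).map (runAt lst)).length := by
    rw [hcount, List.length_map]
  have hB := altFold_eq lst lst.length
  simp only [final_countdown, final_countdown_alt, hA, hB, ← hones]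
  rw [hlen]

-- ===== VERDICT (by name: the statement is the Claim_ definition above) =====
theorem final_countdown_spec : Claim_equal_final_countdown := by
  intro lst _
  unfold Spec_final_countdown
  exact final_countdown_eq lst
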